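-- pv_equiv track=rewrite | github.com/k-tahiro/PreSumm | src/preprocess_japanese.py | subtokens2tokens
-- ===== SOURCE A (Python) =====
-- def subtokens2tokens(subtokens: list) -> list:
--     tokens = []
--     temp = []
--     for subtoken in subtokens:
--         if not temp:
--             temp.append(subtoken)
--             continue
--
--         if subtoken.startswith('##'):
--             temp.append(subtoken[2:])
--             continue
--
--         tokens.append(''.join(temp))
--         temp = [subtoken]
--
--     if temp:
--         tokens.append(''.join(temp))
--
--     return tokens
-- ===== SOURCE B (Python) =====
-- def subtokens2tokens(subtokens: list) -> list:
--     tokens = []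
--     i = 0
--     n = len(subtokens)
--     while i < n:
--         j = i + 1
--         while j < n and subtokens[j].startswith('##'):
--             j += 1
--         tokens.append(''.join([subtokens[i]] + [s[2:] for s in subtokens[i + 1:j]]))
--         i = j
--     return tokens
-- ===== Notes on version B (the rewrite author's own statement) =====
-- stated objective: alternative
-- what changed: Replaces A's temp-buffer-and-flush fold with a group-at-a-time scan: each token is emitted as soon as its whole run of '##'-continuations has been consumed, so no buffer state or final flush is needed.
import Mathlib
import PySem

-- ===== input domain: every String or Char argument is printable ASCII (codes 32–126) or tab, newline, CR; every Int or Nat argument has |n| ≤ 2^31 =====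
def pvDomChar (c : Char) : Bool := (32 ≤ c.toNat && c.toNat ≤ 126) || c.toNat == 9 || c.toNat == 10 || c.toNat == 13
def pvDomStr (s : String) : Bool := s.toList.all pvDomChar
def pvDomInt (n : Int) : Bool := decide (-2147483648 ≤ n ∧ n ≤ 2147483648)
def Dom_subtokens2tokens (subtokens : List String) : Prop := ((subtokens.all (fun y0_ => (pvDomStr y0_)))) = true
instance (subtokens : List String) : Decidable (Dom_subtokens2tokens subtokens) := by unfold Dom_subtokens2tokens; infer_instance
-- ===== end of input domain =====

-- B replaces A's temp-buffer-and-flush loop with a group-at-a-time scan (consume each run of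
-- '##'-continuations, emit the joined token immediately); same cost, no buffer state or final flush.

-- subtoken.startswith('##')  and  subtoken[2:], shared by both Pythons' code
def pvCont (t : String) : Bool := PySem.Str.startswith t "##"
def pvStrip (t : String) : String := PySem.Str.slice t (some 2) none

-- ===== PORT A =====
-- one loop iteration of A: state is (tokens, temp)
def pvStepA (st : List String × List String) (subtoken : String) : List String × List String :=
  if st.2 = [] then (st.1, st.2 ++ [subtoken])
  else if pvCont subtoken then (st.1, st.2 ++ [pvStrip subtoken])
  else (st.1 ++ [PySem.Str.join "" st.2], [subtoken])

def subtokens2tokens (subtokens : List String) : List String :=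
  let st := subtokens.foldl pvStepA ([], [])
  if st.2 ≠ [] then st.1 ++ [PySem.Str.join "" st.2] else st.1

-- ===== PORT B =====
def subtokens2tokens_alt : List String → List String
  | [] => []
  | s :: rest =>
    -- inner while: j scans past the run of '##'-continuations (takeWhile/dropWhile)
    PySem.Str.join "" (s :: (rest.takeWhile pvCont).map pvStrip) ::
      subtokens2tokens_alt (rest.dropWhile pvCont)
termination_by l => l.length
decreasing_by
  simp only [List.length_cons]
  exact Nat.lt_succ_of_le (List.length_dropWhile_le _ _)

-- ===== PRECONDITION & SPEC =====
def Spec_subtokens2tokens (subtokens : List String) (out : List String) : Prop := out = subtokens2tokens_alt subtokens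
instance (subtokens : List String) (out : List String) : Decidable (Spec_subtokens2tokens subtokens out) := by unfold Spec_subtokens2tokens; infer_instance

-- ===== CLAIM (what is proved, stated in full; the proofs are below) =====
def Claim_equal_subtokens2tokens : Prop := ∀ (subtokens : List String), Dom_subtokens2tokens subtokens → Spec_subtokens2tokens subtokens (subtokens2tokens subtokens)

-- ===== LEMMAS AND PROOFS =====

theorem pvAlt_nil : subtokens2tokens_alt [] = [] := by
  rw [subtokens2tokens_alt]

theorem pvAlt_cons (s : String) (rest : List String) :
    subtokens2tokens_alt (s :: rest) =
      PySem.Str.join "" (s :: (rest.takeWhile pvCont).map pvStrip) ::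
        subtokens2tokens_alt (rest.dropWhile pvCont) := by
  rw [subtokens2tokens_alt]

-- A's loop, started with a nonempty buffer `temp`, flushes `temp` extended by the current run of
-- continuations and then behaves like B on the rest of the input.
theorem pvLoopA (l : List String) : ∀ (tokens temp : List String), temp ≠ [] →
    (let st := l.foldl pvStepA (tokens, temp)
     if st.2 ≠ [] then st.1 ++ [PySem.Str.join "" st.2] else st.1) =
    tokens ++ PySem.Str.join "" (temp ++ (l.takeWhile pvCont).map pvStrip) ::
      subtokens2tokens_alt (l.dropWhile pvCont) := by
  induction l with
  | nil => intro tokens temp h; simp [pvAlt_nil, h]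
  | cons x l ih =>
    intro tokens temp h
    by_cases hx : pvCont x
    · have e : pvStepA (tokens, temp) x = (tokens, temp ++ [pvStrip x]) := by
        simp [pvStepA, h, hx]
      simp only [List.foldl_cons, e, List.takeWhile_cons_of_pos hx, List.dropWhile_cons_of_pos hx]
      rw [ih tokens (temp ++ [pvStrip x]) (by simp)]
      simp
    · have e : pvStepA (tokens, temp) x = (tokens ++ [PySem.Str.join "" temp], [x]) := by
        simp [pvStepA, h, hx]
      simp only [List.foldl_cons, e, List.takeWhile_cons_of_neg hx, List.dropWhile_cons_of_neg hx]
      rw [ih (tokens ++ [PySem.Str.join "" temp]) [x] (by simp), pvAlt_cons]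
      simp

-- ===== VERDICT (by name: the statement is the Claim_ definition above) =====
theorem subtokens2tokens_spec : Claim_equal_subtokens2tokens := by
  intro subtokens _
  unfold Spec_subtokens2tokens subtokens2tokens
  cases subtokens with
  | nil => simp [pvAlt_nil]
  | cons x l =>
    have e : pvStepA ([], []) x = ([], [x]) := by simp [pvStepA]
    simp only [List.foldl_cons, e]
    rw [pvLoopA l [] [x] (by simp), pvAlt_cons]
    simp
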